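-- pv_equiv track=rewrite | github.com/jacobb108/hurricane_program | jacob_blau.py | most_affected_finder
-- ===== SOURCE A (Python) =====
-- def most_affected_finder(area_dict):
--   count_dict = {}
--   for area in area_dict:
--     count = area_dict[area]
--     if count not in count_dict:
--       count_dict[count] = [area]
--     else:
--       count_dict[count].append(area)
--   sorted_counts = sorted(count_dict.items(),reverse=True)
--   sorted_count_dict = {count:areas for (count, areas) in sorted_counts}
--   return sorted_count_dict
-- ===== SOURCE B (Python) =====
-- def most_affected_finder(area_dict):
--   counts = sorted(set(area_dict.values()), reverse=True)
--   return {c: [area for area, count in area_dict.items() if count == c] for c in counts}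
-- ===== Notes on version B (the rewrite author's own statement) =====
-- stated objective: simpler
-- what changed: Instead of incrementally building a count->areas dict by insert-or-append and then sorting its items, B sorts the distinct counts descending once and builds the result directly with one filtering comprehension per count.
import Mathlib
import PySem

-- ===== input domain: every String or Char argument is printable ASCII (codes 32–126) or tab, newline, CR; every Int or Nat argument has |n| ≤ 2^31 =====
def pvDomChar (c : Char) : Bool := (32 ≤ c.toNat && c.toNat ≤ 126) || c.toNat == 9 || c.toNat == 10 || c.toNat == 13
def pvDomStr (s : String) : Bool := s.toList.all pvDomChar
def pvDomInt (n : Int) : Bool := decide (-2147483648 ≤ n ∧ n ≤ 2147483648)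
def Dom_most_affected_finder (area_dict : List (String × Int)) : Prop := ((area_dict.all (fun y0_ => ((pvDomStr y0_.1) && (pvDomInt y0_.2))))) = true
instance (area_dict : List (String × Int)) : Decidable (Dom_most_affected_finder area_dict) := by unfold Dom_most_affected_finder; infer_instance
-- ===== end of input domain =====

-- B replaces A's incremental insert-or-append grouping dict plus a final sort by a single
-- descending sort of the distinct counts followed by one filtering comprehension per count
-- (simpler decomposition; not claimed faster).

-- ===== PORT A =====
def most_affected_finder (area_dict : List (String × Int)) : List (Int × List String) :=
  let count_dict : PySem.Dict Int (List String) :=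
    (PySem.Dict.keys (⟨area_dict⟩ : PySem.Dict String Int)).foldl
      (fun cd area =>
        -- area_dict[area]: the key always comes from area_dict, so the lookup never raises;
        -- the default 0 of getD is never used
        let count := PySem.Dict.getD (⟨area_dict⟩ : PySem.Dict String Int) area 0
        if cd.contains count then cd.modify count [] (fun l => l ++ [area])
        else cd.insert count [area]) PySem.Dict.empty
  -- sorted(count_dict.items(), reverse=True) compares the (count, areas) tuples; the counts
  -- are dict keys, hence pairwise distinct, so the comparison never reads the list
  -- component: sorting by the count alone is exact here
  let sorted_counts := PySem.List.sorted count_dict.items (fun kv => kv.1) true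
  (PySem.Dict.ofList sorted_counts).items

-- ===== PORT B =====
def most_affected_finder_alt (area_dict : List (String × Int)) : List (Int × List String) :=
  let counts := PySem.List.sorted
    (PySem.Set.ofList (PySem.Dict.values (⟨area_dict⟩ : PySem.Dict String Int))) (fun c => c) true
  (PySem.Dict.ofList (counts.map (fun c =>
    (c, ((PySem.Dict.items (⟨area_dict⟩ : PySem.Dict String Int)).filter
          (fun p => p.2 == c)).map (fun p => p.1))))).items

-- ===== PRECONDITION & SPEC =====
-- Pre_ requires the association-list keys to be distinct: a Python dict cannot contain
-- duplicate keys, so only key-distinct lists encode an actual input of the Python function.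
def Pre_most_affected_finder (area_dict : List (String × Int)) : Prop :=
  (area_dict.map (fun p => p.1)).Nodup
instance (area_dict : List (String × Int)) : Decidable (Pre_most_affected_finder area_dict) := by
  unfold Pre_most_affected_finder; infer_instance
def pvWitness_most_affected_finder : (List (String × Int)) := [("a", 1), ("b", 2), ("c", 1)]
def Spec_most_affected_finder (area_dict : List (String × Int)) (out : List (Int × List String)) : Prop := out = most_affected_finder_alt area_dict
instance (area_dict : List (String × Int)) (out : List (Int × List String)) : Decidable (Spec_most_affected_finder area_dict out) := by unfold Spec_most_affected_finder; infer_instance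

-- ===== CLAIM (what is proved, stated in full; the proofs are below) =====
def Claim_equal_most_affected_finder : Prop := ∀ (area_dict : List (String × Int)), Dom_most_affected_finder area_dict → Pre_most_affected_finder area_dict → Spec_most_affected_finder area_dict (most_affected_finder area_dict)

-- ===== LEMMAS AND PROOFS =====

-- A's insert-or-append branch is exactly Dict.modify (append to the bucket, [] when absent)
theorem mafStep_eq (cd : PySem.Dict Int (List String)) (c : Int) (a : String) :
    (if cd.contains c then cd.modify c [] (fun l => l ++ [a]) else cd.insert c [a])
      = cd.modify c [] (fun l => l ++ [a]) := by
  by_cases h : cd.contains c = true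
  · simp [h]
  · simp [h, PySem.Dict.modify,
      PySem.Dict.getD_of_not_contains (d := cd) (by simpa using h) (d0 := ([] : List String))]

-- a dict comprehension over pairwise-distinct keys returns exactly those items
theorem items_ofList_of_nodup {ν : Type} (l : List (Int × ν)) (h : (l.map (fun p => p.1)).Nodup) :
    (PySem.Dict.ofList l).items = l := by
  have hfresh : ∀ p ∈ l, (PySem.Dict.empty : PySem.Dict Int ν).contains p.1 = false := by
    intro p _; simp [PySem.Dict.contains_empty]
  have := PySem.Dict.items_foldl_insert_fresh (l := l) (k := fun p => p.1) (v := fun p => p.2)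
      (d := PySem.Dict.empty) hfresh h
  simpa [PySem.Dict.ofList, PySem.Dict.update] using this

-- A's grouping loop, rewritten over the (count, area) pairs
theorem maf_count_dict (ad : List (String × Int)) (hnd : (ad.map (fun p => p.1)).Nodup) :
    ((PySem.Dict.keys (⟨ad⟩ : PySem.Dict String Int)).foldl
      (fun cd area =>
        let count := PySem.Dict.getD (⟨ad⟩ : PySem.Dict String Int) area 0
        if cd.contains count then cd.modify count [] (fun l => l ++ [area])
        else cd.insert count [area]) PySem.Dict.empty)
      = ad.foldl (fun cd p => cd.modify p.2 [] (fun l => l ++ [p.1])) PySem.Dict.empty := by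
  have hkeys : PySem.Dict.keys (⟨ad⟩ : PySem.Dict String Int) = ad.map (fun p => p.1) := rfl
  rw [hkeys, List.foldl_map]
  refine PySem.List.foldl_congr_mem _ _ _ _ ?_
  intro cd p hp
  have hget : PySem.Dict.getD (⟨ad⟩ : PySem.Dict String Int) p.1 0 = p.2 := by
    refine PySem.Dict.getD_of_mem_items (d := (⟨ad⟩ : PySem.Dict String Int)) ?_ ?_ 0
    · simpa using hp
    · simpa using hnd
  simp only [hget]
  exact mafStep_eq cd p.2 p.1

theorem maf_both (ad : List (String × Int)) (hnd : (ad.map (fun p => p.1)).Nodup) :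
    most_affected_finder ad = most_affected_finder_alt ad := by
  classical
  set vals := ad.map (fun p => p.2) with hvals
  set S := PySem.Set.ofList vals with hS
  set counts := PySem.List.sorted S (fun c => c) true with hcounts
  set f : Int → List String := fun c => (ad.filter (fun p => p.2 == c)).map (fun p => p.1) with hf
  set gpair : Int → Int × List String := fun c => (c, f c) with hgpair
  -- the grouping dict
  set cd' := ad.foldl (fun cd p => cd.modify p.2 [] (fun l => l ++ [p.1])) PySem.Dict.empty with hcd'
  have hget : ∀ c : Int, cd'.getD c [] = f c := by
    intro c
    have hswap : cd' = (ad.map (fun p => (p.2, p.1))).foldl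
        (fun d q => d.modify q.1 [] (fun l => l ++ [q.2])) PySem.Dict.empty := by
      rw [List.foldl_map]
    rw [hswap, PySem.Dict.getD_foldl_modify_append]
    simp [hf, List.filter_map, Function.comp_def]
  have hk : cd'.keys = S := by
    rw [hcd', PySem.Dict.keys_foldl_modify_key ad (fun p => p.2) [] (fun _ p => fun l => l ++ [p.1])]
    simp [hS, hvals, PySem.Dict.keys_empty, PySem.Set.update_nil_left]
  have hknd : cd'.keys.Nodup := by
    rw [hcd']
    exact PySem.Dict.nodup_keys_foldl_modify_key ad (fun p => p.2) [] (fun _ p => fun l => l ++ [p.1])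
      PySem.Dict.empty (by exact PySem.Dict.nodup_keys_empty)
  have hitems : cd'.items = S.map gpair := by
    rw [PySem.Dict.items_eq_map_keys cd' hknd [], hk]
    exact List.map_congr_left (fun c _ => by simp [hgpair, hget c])
  -- the sort
  have hSnd : S.Nodup := PySem.Set.nodup_ofList vals
  have hcnd : counts.Nodup := ((PySem.List.sorted_perm S (fun c => c) true).nodup_iff).mpr hSnd
  have hcpw : counts.Pairwise (fun a b => b < a) := by
    have hle : counts.Pairwise (fun a b => b ≤ a) := PySem.List.sorted_pairwise_rev S (fun c => c)
    exact (hle.and hcnd).imp (fun h => lt_of_le_of_ne h.1 (Ne.symm h.2))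
  have hsorted : PySem.List.sorted (S.map gpair) (fun kv => kv.1) true = counts.map gpair := by
    refine PySem.List.sorted_rev_eq_of_perm_of_pairwise_gt _ _ _ ?_ ?_
    · exact (PySem.List.sorted_perm S (fun c => c) true).map gpair
    · exact (List.pairwise_map).mpr (by simpa [hgpair] using hcpw)
  have hcmnd : ((counts.map gpair).map (fun p => p.1)).Nodup := by
    simpa [hgpair, List.map_map, Function.comp_def] using hcnd
  -- assemble both sides
  have hA : most_affected_finder ad = counts.map gpair := by
    unfold most_affected_finder
    rw [maf_count_dict ad hnd, ← hcd']
    show (PySem.Dict.ofList (PySem.List.sorted cd'.items (fun kv => kv.1) true)).items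
      = List.map gpair counts
    rw [hitems, hsorted, items_ofList_of_nodup _ hcmnd]
  have hB : most_affected_finder_alt ad = counts.map gpair := by
    unfold most_affected_finder_alt
    have hv : PySem.Dict.values (⟨ad⟩ : PySem.Dict String Int) = vals := rfl
    have hi : PySem.Dict.items (⟨ad⟩ : PySem.Dict String Int) = ad := rfl
    rw [hv, hi, ← hS, ← hcounts]
    exact items_ofList_of_nodup _ (by simpa [hgpair, List.map_map, Function.comp_def] using hcnd)
  rw [hA, hB]

-- ===== VERDICT (by name: the statement is the Claim_ definition above) =====
theorem most_affected_finder_spec : Claim_equal_most_affected_finder := by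
  intro ad _ hpre
  exact maf_both ad hpre
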